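-- pv_equiv track=rewrite | github.com/CinderedShadow/PortrArt | src/PortrArt.py | eyesFilter
-- ===== SOURCE A (Python) =====
-- def eyesFilter(app, realEyeCoordinates):
--     # Find two biggest rectangles
--     # Initialize variables for the largest and second largest eye regions
--     largestArea = 0
--     largestX, largestY, largestL, largestH = 0, 0, 0, 0
--
--     secondLargestArea = 0
--     secondLargestX, secondLargestY, secondLargestL, secondLargestH = 0, 0, 0, 0
--
--     # Iterate through the eye region coordinates
--     for (x, y, length, height) in realEyeCoordinates:
--         area = length * height
--         if area > largestArea:  # New largest region found
--             # Update second largest before replacing the largest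
--             secondLargestArea = largestArea
--             secondLargestX, secondLargestY, secondLargestL, secondLargestH = (largestX, largestY, largestL, largestH)
--             # Update the largest region
--             largestArea = area
--             largestX, largestY, largestL, largestH = x, y, length, height
--         elif area > secondLargestArea:  # New second largest region found
--             secondLargestArea = area
--             secondLargestX, secondLargestY, secondLargestL, secondLargestH = (x, y, length, height)
--
--     # Store the results in tuples
--     largestEyeRegion = (largestX, largestY, largestL, largestH)
--     secondLargestEyeRegion = (secondLargestX, secondLargestY, secondLargestL, secondLargestH)
--
--     return [largestEyeRegion, secondLargestEyeRegion]
-- ===== SOURCE B (Python) =====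
-- def eyesFilter(app, realEyeCoordinates):
--     top2 = sorted((r for r in realEyeCoordinates if r[2] * r[3] > 0),
--                   key=lambda r: r[2] * r[3], reverse=True)[:2]
--     top2 += [(0, 0, 0, 0)] * (2 - len(top2))
--     return top2
-- ===== Notes on version B (the rewrite author's own statement) =====
-- stated objective: simpler
-- what changed: Replaces A's hand-rolled largest/second-largest tracking loop with dedicated state variables by filtering out non-positive-area rectangles, stable-sorting descending by area, taking the first two and padding with (0,0,0,0).
import Mathlib
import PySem

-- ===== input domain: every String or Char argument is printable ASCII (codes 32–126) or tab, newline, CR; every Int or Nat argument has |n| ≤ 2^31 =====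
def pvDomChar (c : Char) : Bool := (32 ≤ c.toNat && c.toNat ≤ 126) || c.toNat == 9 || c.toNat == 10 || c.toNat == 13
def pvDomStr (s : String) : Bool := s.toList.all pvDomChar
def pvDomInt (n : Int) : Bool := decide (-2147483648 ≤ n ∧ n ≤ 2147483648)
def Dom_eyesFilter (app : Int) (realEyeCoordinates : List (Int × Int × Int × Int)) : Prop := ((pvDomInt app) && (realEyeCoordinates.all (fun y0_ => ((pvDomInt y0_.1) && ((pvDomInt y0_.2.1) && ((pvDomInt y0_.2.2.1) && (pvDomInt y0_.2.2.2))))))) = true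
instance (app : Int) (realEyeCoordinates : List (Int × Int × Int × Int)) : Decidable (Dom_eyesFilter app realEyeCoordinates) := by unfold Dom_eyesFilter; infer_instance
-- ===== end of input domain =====

-- B replaces A's hand-rolled largest/second-largest tracking loop by filter-positive-area,
-- stable sort descending by area, take two, pad with (0,0,0,0): simpler, not faster.

-- ===== PORT A =====
-- A's loop state: (largestArea, (largestX,largestY,largestL,largestH), secondLargestArea, (secondX,secondY,secondL,secondH))
def eyesFilterStep (s : Int × (Int × Int × Int × Int) × Int × (Int × Int × Int × Int))
    (r : Int × Int × Int × Int) : Int × (Int × Int × Int × Int) × Int × (Int × Int × Int × Int) :=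
  let area := r.2.2.1 * r.2.2.2
  if area > s.1 then (area, r, s.1, s.2.1)
  else if area > s.2.2.1 then (s.1, s.2.1, area, r)
  else s

def eyesFilter (_app : Int) (realEyeCoordinates : List (Int × Int × Int × Int)) : List (Int × Int × Int × Int) :=
  let s := realEyeCoordinates.foldl eyesFilterStep (0, (0, 0, 0, 0), 0, (0, 0, 0, 0))
  [s.2.1, s.2.2.2]

-- ===== PORT B =====
def eyesFilter_alt (_app : Int) (realEyeCoordinates : List (Int × Int × Int × Int)) : List (Int × Int × Int × Int) :=
  let top2 := (PySem.List.sorted (realEyeCoordinates.filter (fun r => decide (0 < r.2.2.1 * r.2.2.2)))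
      (fun r => r.2.2.1 * r.2.2.2) true).take 2
  top2 ++ List.replicate (2 - top2.length) (0, 0, 0, 0)

-- ===== PRECONDITION & SPEC =====
def Spec_eyesFilter (app : Int) (realEyeCoordinates : List (Int × Int × Int × Int)) (out : List (Int × Int × Int × Int)) : Prop := out = eyesFilter_alt app realEyeCoordinates
instance (app : Int) (realEyeCoordinates : List (Int × Int × Int × Int)) (out : List (Int × Int × Int × Int)) : Decidable (Spec_eyesFilter app realEyeCoordinates out) := by unfold Spec_eyesFilter; infer_instance

-- ===== CLAIM (what is proved, stated in full; the proofs are below) =====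
def Claim_equal_eyesFilter : Prop := ∀ (app : Int) (realEyeCoordinates : List (Int × Int × Int × Int)), Dom_eyesFilter app realEyeCoordinates → Spec_eyesFilter app realEyeCoordinates (eyesFilter app realEyeCoordinates)

-- ===== LEMMAS AND PROOFS =====

-- A's loop state read off a descending accumulator list: head = largest, second element = second largest.
def pvSt (acc : List (Int × Int × Int × Int)) : Int × (Int × Int × Int × Int) × Int × (Int × Int × Int × Int) :=
  match acc with
  | [] => (0, (0, 0, 0, 0), 0, (0, 0, 0, 0))
  | [a] => (a.2.2.1 * a.2.2.2, a, 0, (0, 0, 0, 0))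
  | a :: b :: _ => (a.2.2.1 * a.2.2.2, a, b.2.2.1 * b.2.2.2, b)

def pvIns (acc : List (Int × Int × Int × Int)) (r : Int × Int × Int × Int) : List (Int × Int × Int × Int) :=
  if (0 < r.2.2.1 * r.2.2.2 : Prop) then
    PySem.List.insertBy (fun a b => decide (b.2.2.1 * b.2.2.2 < a.2.2.1 * a.2.2.2)) r acc
  else acc

theorem pvIns_pos (acc : List (Int × Int × Int × Int)) (r : Int × Int × Int × Int)
    (h : ∀ x ∈ acc, 0 < x.2.2.1 * x.2.2.2) : ∀ x ∈ pvIns acc r, 0 < x.2.2.1 * x.2.2.2 := by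
  intro x hx
  by_cases hr : (0 < r.2.2.1 * r.2.2.2)
  · simp only [pvIns, if_pos hr] at hx
    rcases (PySem.List.mem_insertBy _ _ _ _).1 hx with h1 | h1
    · exact h1 ▸ hr
    · exact h x h1
  · simp only [pvIns, if_neg hr] at hx
    exact h x hx

theorem pvStep_pvIns (acc : List (Int × Int × Int × Int)) (r : Int × Int × Int × Int)
    (h : ∀ x ∈ acc, 0 < x.2.2.1 * x.2.2.2) :
    eyesFilterStep (pvSt acc) r = pvSt (pvIns acc r) := by
  by_cases hr : (0 < r.2.2.1 * r.2.2.2)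
  · simp only [pvIns, if_pos hr]
    match acc with
    | [] => simp [eyesFilterStep, pvSt, PySem.List.insertBy, hr]
    | [a] =>
      by_cases h1 : (a.2.2.1 * a.2.2.2 < r.2.2.1 * r.2.2.2)
      · simp [eyesFilterStep, pvSt, PySem.List.insertBy, h1]
      · simp [eyesFilterStep, pvSt, PySem.List.insertBy, h1, hr, not_lt.1 h1]
    | a :: b :: t =>
      by_cases h1 : (a.2.2.1 * a.2.2.2 < r.2.2.1 * r.2.2.2)
      · simp [eyesFilterStep, pvSt, PySem.List.insertBy, h1]
      · by_cases h2 : (b.2.2.1 * b.2.2.2 < r.2.2.1 * r.2.2.2)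
        · simp [eyesFilterStep, pvSt, PySem.List.insertBy, h1, h2]
        · simp [eyesFilterStep, pvSt, PySem.List.insertBy, h1, h2, not_lt.1 h1]
  · have ha : ¬ (r.2.2.1 * r.2.2.2 > (pvSt acc).1) := by
      match acc with
      | [] => simpa [pvSt] using not_lt.1 hr
      | [a] => exact fun hlt => hr (lt_trans (h a (by simp)) hlt)
      | a :: b :: t => exact fun hlt => hr (lt_trans (h a (by simp)) hlt)
    have hb : ¬ (r.2.2.1 * r.2.2.2 > (pvSt acc).2.2.1) := by
      match acc with
      | [] => simpa [pvSt] using not_lt.1 hr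
      | [a] => simpa [pvSt] using not_lt.1 hr
      | a :: b :: t => exact fun hlt => hr (lt_trans (h b (by simp)) hlt)
    simp [pvIns, if_neg hr, eyesFilterStep, if_neg ha, if_neg hb]

theorem pvFold_eq (xs acc : List (Int × Int × Int × Int))
    (h : ∀ x ∈ acc, 0 < x.2.2.1 * x.2.2.2) :
    xs.foldl eyesFilterStep (pvSt acc) = pvSt (xs.foldl pvIns acc) := by
  induction xs generalizing acc with
  | nil => rfl
  | cons r xs ih =>
    simp only [List.foldl_cons, pvStep_pvIns acc r h]
    exact ih (pvIns acc r) (pvIns_pos acc r h)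

-- ===== VERDICT (by name: the statement is the Claim_ definition above) =====
theorem eyesFilter_spec : Claim_equal_eyesFilter := by
  intro app xs _
  show eyesFilter app xs = eyesFilter_alt app xs
  have hsort : (PySem.List.sorted (xs.filter (fun r => decide (0 < r.2.2.1 * r.2.2.2)))
      (fun r => r.2.2.1 * r.2.2.2) true) = xs.foldl pvIns [] := by
    rw [PySem.List.sorted_rev_eq_foldl_insertBy, List.foldl_filter]
    congr 1
    funext acc r
    simp [pvIns]
  have hfold := pvFold_eq xs [] (by simp)
  simp only [eyesFilter, eyesFilter_alt, hsort, pvSt] at hfold ⊢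
  rw [hfold]
  match xs.foldl pvIns [] with
  | [] => rfl
  | [a] => rfl
  | a :: b :: t => rfl
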